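-- pv_equiv track=rewrite | github.com/yuvalbahar99/home-exercise | algorithmic/polindrom.py | is_sorted_polyndrom
-- ===== SOURCE A (Python) =====
-- def is_sorted_polyndrom(text: str) -> bool:
--     if len(text) < 2:
--         return True
--     first_half = text[:(len(text) / 2).__ceil__()]
--     oposite_second_half = text[:(len(text) / 2).__floor__() - 1:-1]
--     if first_half != oposite_second_half:
--         return False
--     for letter_index in range(len(first_half) - 1):
--         if first_half[letter_index] > first_half[letter_index + 1]:
--             return False
--     return True
-- ===== SOURCE B (Python) =====
-- def is_sorted_polyndrom(text: str) -> bool: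
--     n = len(text)
--     if n < 2:
--         return True
--     half = (n + 1) // 2
--     i, j = 0, n - 1
--     while i < j:
--         if text[i] != text[j]:
--             return False
--         if i + 1 < half and text[i] > text[i + 1]:
--             return False
--         i += 1
--         j -= 1
--     return True
-- ===== Notes on version B (the rewrite author's own statement) =====
-- stated objective: alternative
-- what changed: A builds two sliced substrings (the forward first half and the reversed second half), compares them wholesale and then runs a separate adjacent-pair loop over the first half; B builds no substrings at all and does one two-pointer pass (i up, j down) that checks the palindrome property and the first-half ordering in the same traversal.
import Mathlib
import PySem

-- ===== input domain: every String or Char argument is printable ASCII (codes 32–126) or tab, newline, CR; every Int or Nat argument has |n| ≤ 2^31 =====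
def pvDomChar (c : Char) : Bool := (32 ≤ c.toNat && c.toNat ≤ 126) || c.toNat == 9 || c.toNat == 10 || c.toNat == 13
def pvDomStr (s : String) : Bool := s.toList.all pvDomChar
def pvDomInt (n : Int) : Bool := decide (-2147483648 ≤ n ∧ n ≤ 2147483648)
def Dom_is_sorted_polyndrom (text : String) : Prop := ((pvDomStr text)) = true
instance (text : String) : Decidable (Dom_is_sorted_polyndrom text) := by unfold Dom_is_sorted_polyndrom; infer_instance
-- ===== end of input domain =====

-- B replaces A's two slice-built substrings (forward half, reversed second half) and A's
-- separate sortedness loop by one two-pointer pass checking both properties in place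
-- (objective: alternative — one traversal, no intermediate strings).

-- ===== PORT A =====
-- Port of A on text.toList; every index A uses is in range, so getD never hits its default.
def is_sorted_polyndrom (text : String) : Bool :=
  let cs := text.toList
  if cs.length < 2 then true
  else
    let n : Int := (cs.length : Int)
    -- (len(text) / 2).__ceil__() = (len + 1) // 2 (the float division is exact here)
    let first_half := PySem.List.slice cs none (some (((cs.length + 1) / 2 : Nat) : Int))
    -- text[:(len(text)/2).__floor__() - 1 : -1]; step = -1 ≠ 0, so slice? is never none
    let oposite_second_half :=
      (PySem.List.slice? cs none (some (PySem.Int.floordiv n 2 - 1)) (-1)).getD []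
    if first_half ≠ oposite_second_half then false
    else
      (List.range (first_half.length - 1)).all (fun letter_index =>
        !(decide (first_half.getD (letter_index + 1) ' ' < first_half.getD letter_index ' ')))

-- ===== PORT B =====
-- The two-pointer while-loop of Source B; `half` is (n+1)//2; indices stay in range.
def pvAltLoop (cs : List Char) (half : Nat) (i j : Nat) : Bool :=
  if _h : i < j then
    if cs.getD i ' ' ≠ cs.getD j ' ' then false
    else if i + 1 < half ∧ cs.getD (i + 1) ' ' < cs.getD i ' ' then false
    else pvAltLoop cs half (i + 1) (j - 1)
  else true
termination_by j - i
decreasing_by omega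

def is_sorted_polyndrom_alt (text : String) : Bool :=
  let cs := text.toList
  let n := cs.length
  if n < 2 then true
  else pvAltLoop cs ((n + 1) / 2) 0 (n - 1)

-- ===== PRECONDITION & SPEC =====
def Spec_is_sorted_polyndrom (text : String) (out : Bool) : Prop := out = is_sorted_polyndrom_alt text
instance (text : String) (out : Bool) : Decidable (Spec_is_sorted_polyndrom text out) := by unfold Spec_is_sorted_polyndrom; infer_instance

-- ===== CLAIM (what is proved, stated in full; the proofs are below) =====
def Claim_equal_is_sorted_polyndrom : Prop := ∀ (text : String), Dom_is_sorted_polyndrom text → Spec_is_sorted_polyndrom text (is_sorted_polyndrom text)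

-- ===== LEMMAS AND PROOFS =====

-- A's reversed slice text[:n//2-1:-1] is the reverse of the second half (for n ≥ 2).
theorem pv_slice_rev (cs : List Char) (h2 : 2 ≤ cs.length) :
    (PySem.List.slice? cs none (some (PySem.Int.floordiv (cs.length : Int) 2 - 1)) (-1)).getD []
      = (cs.drop (cs.length / 2)).reverse := by
  have hfd : PySem.Int.floordiv (cs.length : Int) 2 = ((cs.length / 2 : Nat) : Int) :=
    PySem.Int.floordiv_natCast _ _
  set n := cs.length with hn
  have hm : 1 ≤ n / 2 := by omega
  have hm2 : n / 2 ≤ n - 1 := by omega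
  simp only [PySem.List.slice?, PySem.List.sliceIndices, hfd]
  norm_num
  have e0 : ((n : Int) / 2) = ((n / 2 : Nat) : Int) := by
    rw [Int.natCast_div]; norm_num
  rw [e0]
  have hc1 : ¬ (((n / 2 : Nat) : Int) < 1) := by omega
  rw [if_neg hc1, min_eq_left (by omega), if_pos (by omega)]
  have hcount : ((n : Int) - 1 - (((n / 2 : Nat) : Int) - 1)).toNat = n - n / 2 := by omega
  rw [hcount]
  have hmap : ∀ x ∈ List.range (n - n / 2),
      cs[((n : Int) - 1 + -(x : Int)).toNat]? = (some ∘ fun x => cs.getD (n - 1 - x) ' ') x := by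
    intro x hx
    rw [List.mem_range] at hx
    have hidx : ((n : Int) - 1 + -(x : Int)).toNat = n - 1 - x := by omega
    simp [hidx, List.getElem?_eq_getElem (by omega : n - 1 - x < cs.length)]
  rw [List.filterMap_congr hmap, List.filterMap_eq_map]
  apply List.ext_getElem
  · simp; omega
  · intro i hi1 hi2
    simp only [List.length_map, List.length_range] at hi1
    simp only [List.length_reverse, List.length_drop] at hi2
    simp only [List.getElem_map, List.getElem_range, List.getElem_reverse, List.getElem_drop,
      List.length_drop]
    rw [List.getD_eq_getElem cs ' ' (by omega : n - 1 - i < cs.length)]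
    have hidx2 : n / 2 + (cs.length - n / 2 - 1 - i) = n - 1 - i := by omega
    simp_rw [hidx2]

-- list equality of A's two halves ↔ pointwise mirror equality on the first ⌊n/2⌋ positions
theorem pv_mirror_iff (cs : List Char) (h2 : 2 ≤ cs.length) :
    (cs.take ((cs.length + 1) / 2) = (cs.drop (cs.length / 2)).reverse)
      ↔ (∀ k < cs.length / 2, cs.getD k ' ' = cs.getD (cs.length - 1 - k) ' ') := by
  set n := cs.length with hn
  have hh : (n + 1) / 2 ≤ n := by omega
  constructor
  · intro heq k hk
    have hk1 : k < (cs.take ((n + 1) / 2)).length := by simp; omega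
    have := List.getElem_of_eq heq (i := k) hk1
    rw [List.getElem_take, List.getElem_reverse, List.getElem_drop] at this
    rw [List.getD_eq_getElem cs ' ' (by omega : k < cs.length),
        List.getD_eq_getElem cs ' ' (by omega : n - 1 - k < cs.length), this]
    have hidx : n / 2 + ((List.drop (n / 2) cs).length - 1 - k) = n - 1 - k := by
      simp; omega
    simp_rw [hidx]
  · intro hmir
    apply List.ext_getElem
    · simp; omega
    · intro i hi1 hi2
      simp only [List.length_take] at hi1
      simp only [List.length_reverse, List.length_drop] at hi2
      rw [List.getElem_take, List.getElem_reverse, List.getElem_drop]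
      have hidx : n / 2 + ((List.drop (n / 2) cs).length - 1 - i) = n - 1 - i := by
        simp; omega
      simp_rw [hidx]
      by_cases hk : i < n / 2
      · have := hmir i hk
        rwa [List.getD_eq_getElem cs ' ' (by omega : i < cs.length),
            List.getD_eq_getElem cs ' ' (by omega : n - 1 - i < cs.length)] at this
      · have : n - 1 - i = i := by omega
        simp_rw [this]

-- B's loop computes, along the invariant j = n - 1 - i, the conjunction of the mirror
-- check and the first-half sortedness check from position i on.
theorem pv_altLoop_eq (cs : List Char) (h2 : 2 ≤ cs.length) :
    ∀ d i, i ≤ cs.length / 2 → cs.length / 2 - i = d →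
    pvAltLoop cs ((cs.length + 1) / 2) i (cs.length - 1 - i)
      = ((decide (∀ k < cs.length / 2, i ≤ k →
             cs.getD k ' ' = cs.getD (cs.length - 1 - k) ' ')) &&
         (decide (∀ k < (cs.length + 1) / 2 - 1, i ≤ k →
             ¬ cs.getD (k + 1) ' ' < cs.getD k ' '))) := by
  set n := cs.length with hn
  intro d
  induction d with
  | zero =>
    intro i h1 h0
    rw [pvAltLoop, dif_neg (by omega)]
    rw [eq_comm, Bool.and_eq_true, decide_eq_true_iff, decide_eq_true_iff]
    exact ⟨fun k hk hik => by omega, fun k hk hik => by omega⟩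
  | succ d ih =>
    intro i h1 hd
    have hij : i < n - 1 - i := by omega
    rw [pvAltLoop, dif_pos hij]
    by_cases hne : cs.getD i ' ' ≠ cs.getD (n - 1 - i) ' '
    · rw [if_pos hne, eq_comm, Bool.and_eq_false_iff]
      left
      rw [decide_eq_false_iff_not]
      push Not
      exact ⟨i, by omega, le_refl i, hne⟩
    · rw [if_neg hne]
      push Not at hne
      by_cases hs : i + 1 < (n + 1) / 2 ∧ cs.getD (i + 1) ' ' < cs.getD i ' '
      · rw [if_pos hs, eq_comm, Bool.and_eq_false_iff]
        right
        rw [decide_eq_false_iff_not]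
        push Not
        exact ⟨i, by omega, le_refl i, by simpa using hs.2⟩
      · rw [if_neg hs]
        have hj1 : n - 1 - i - 1 = n - 1 - (i + 1) := by omega
        rw [hj1, ih (i + 1) (by omega) (by omega)]
        push Not at hs
        congr 1
        · rw [decide_eq_decide]
          constructor
          · intro h k hk hik
            rcases Nat.eq_or_lt_of_le hik with rfl | hlt
            · exact hne
            · exact h k hk hlt
          · intro h k hk hik
            exact h k hk (by omega)
        · rw [decide_eq_decide]
          constructor
          · intro h k hk hik
            rcases Nat.eq_or_lt_of_le hik with rfl | hlt
            · exact not_lt.mpr (hs (by omega))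
            · exact h k hk hlt
          · intro h k hk hik
            exact h k hk (by omega)

theorem pv_main (text : String) : is_sorted_polyndrom text = is_sorted_polyndrom_alt text := by
  by_cases hlen : text.toList.length < 2
  · simp only [is_sorted_polyndrom, is_sorted_polyndrom_alt, if_pos hlen]
  · have h2 : 2 ≤ text.toList.length := by omega
    set cs := text.toList with hcs
    set n := cs.length with hn
    rw [is_sorted_polyndrom, is_sorted_polyndrom_alt]
    simp only [← hcs, ← hn, if_neg hlen]
    rw [PySem.List.slice_to_natCast, pv_slice_rev cs h2]
    rw [show n - 1 = n - 1 - 0 from rfl, pv_altLoop_eq cs h2 (n / 2) 0 (by omega) (by omega)]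
    have hget : ∀ k, k < (n + 1) / 2 → (cs.take ((n + 1) / 2)).getD k ' ' = cs.getD k ' ' := by
      intro k hk
      rw [List.getD_eq_getElem _ ' ' (by simp [← hn]; omega), List.getElem_take,
          List.getD_eq_getElem cs ' ' (by omega)]
    by_cases hpal : cs.take ((n + 1) / 2) = (cs.drop (n / 2)).reverse
    · rw [if_neg (not_not_intro hpal)]
      have hM : ∀ k < n / 2, 0 ≤ k → cs.getD k ' ' = cs.getD (n - 1 - k) ' ' :=
        fun k hk _ => (pv_mirror_iff cs h2).mp hpal k hk
      rw [decide_eq_true hM, Bool.true_and]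
      have hlentake : (cs.take ((n + 1) / 2)).length = (n + 1) / 2 := by
        simp [← hn]; omega
      rw [hlentake, Bool.eq_iff_iff, List.all_eq_true]
      simp only [List.mem_range, Bool.not_eq_eq_eq_not, Bool.not_true, decide_eq_false_iff_not,
        decide_eq_true_iff]
      constructor
      · intro h k hk _
        have := h k hk
        rwa [hget k (by omega), hget (k + 1) (by omega)] at this
      · intro h k hk
        rw [hget k (by omega), hget (k + 1) (by omega)]
        exact h k hk (Nat.zero_le k)
    · rw [if_pos hpal]
      have hM : ¬ (∀ k < n / 2, 0 ≤ k → cs.getD k ' ' = cs.getD (n - 1 - k) ' ') :=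
        fun h => hpal ((pv_mirror_iff cs h2).mpr (fun k hk => h k hk (Nat.zero_le k)))
      rw [eq_comm, Bool.and_eq_false_iff]
      left
      exact decide_eq_false hM

-- ===== VERDICT (by name: the statement is the Claim_ definition above) =====
theorem is_sorted_polyndrom_spec : Claim_equal_is_sorted_polyndrom := by
  intro text _
  unfold Spec_is_sorted_polyndrom
  exact pv_main text
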